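-- pv_equiv track=rewrite | github.com/viking-sudo-rm/dfa-extractor | languages.py | trace_acceptance
-- ===== SOURCE A (Python) =====
-- def trace_acceptance(string):
--     state = "b"
--     states = []
--     for token in string:
--         states.append(state)
--         if state == "b" and token == "a":
--             state = "a"
--         elif state == "a" and token == "b":
--             state = "b"
--         else:
--             state = "!"
--     states.append(state)
--     return [int(s == "b") for s in states]
-- ===== SOURCE B (Python) =====
-- def trace_acceptance(string):
--     # longest prefix matching the alternating pattern a,b,a,b,...
--     k = 0
--     expect = "a"
--     for ch in string:
--         if ch != expect:
--             break
--         k += 1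
--         expect = "b" if expect == "a" else "a"
--     return [1 if i <= k and i % 2 == 0 else 0 for i in range(len(string) + 1)]
-- ===== Notes on version B (the rewrite author's own statement) =====
-- stated objective: alternative
-- what changed: Replaced the per-token DFA state simulation with a scan that finds the length k of the longest alternating a/b prefix and then generates the output positionally by the closed rule (1 iff i <= k and i even).
import Mathlib
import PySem

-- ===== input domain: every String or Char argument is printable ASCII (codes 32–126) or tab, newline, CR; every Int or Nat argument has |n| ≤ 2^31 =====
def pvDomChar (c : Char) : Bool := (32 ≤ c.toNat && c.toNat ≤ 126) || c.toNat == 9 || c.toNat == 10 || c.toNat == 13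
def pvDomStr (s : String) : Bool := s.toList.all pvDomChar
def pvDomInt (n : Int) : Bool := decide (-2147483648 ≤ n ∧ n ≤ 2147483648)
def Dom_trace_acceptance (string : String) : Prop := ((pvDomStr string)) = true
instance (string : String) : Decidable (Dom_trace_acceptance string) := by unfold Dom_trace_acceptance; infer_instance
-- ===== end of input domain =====

-- B replaces A's per-token DFA simulation by an alternating-prefix-length scan plus a
-- closed positional rule for the output list (alternative decomposition, same cost).

-- ===== PORT A =====
-- the for-loop of A: collects the state before each token, then the final state
def pvLoopA : List Char → String → List String
  | [], state => [state]
  | token :: ts, state =>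
      state :: pvLoopA ts
        (if state = "b" ∧ token = 'a' then "a"
         else if state = "a" ∧ token = 'b' then "b"
         else "!")

def trace_acceptance (string : String) : List Int :=
  (pvLoopA string.toList "b").map (fun s => if s = "b" then (1 : Int) else 0)

-- ===== PORT B =====
-- the k-finding scan of B: length of the longest prefix matching the alternating pattern
def pvAltK : List Char → Char → Nat
  | [], _ => 0
  | ch :: cs, expect =>
      if ch = expect then 1 + pvAltK cs (if expect = 'a' then 'b' else 'a') else 0

def trace_acceptance_alt (string : String) : List Int :=
  (List.range (string.toList.length + 1)).map
    (fun i => if i ≤ pvAltK string.toList 'a' ∧ i % 2 = 0 then (1 : Int) else 0)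

-- ===== PRECONDITION & SPEC =====
def Spec_trace_acceptance (string : String) (out : List Int) : Prop := out = trace_acceptance_alt string
instance (string : String) (out : List Int) : Decidable (Spec_trace_acceptance string out) := by unfold Spec_trace_acceptance; infer_instance

-- ===== CLAIM (what is proved, stated in full; the proofs are below) =====
def Claim_equal_trace_acceptance : Prop := ∀ (string : String), Dom_trace_acceptance string → Spec_trace_acceptance string (trace_acceptance string)

-- ===== LEMMAS AND PROOFS =====

-- from the dead state "!" the loop stays dead: the output is all zeros
theorem pvLoopA_dead (cs : List Char) :
    (pvLoopA cs "!").map (fun s => if s = "b" then (1 : Int) else 0)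
      = List.replicate (cs.length + 1) 0 := by
  induction cs with
  | nil => simp [pvLoopA]
  | cons c cs ih => simp [pvLoopA, ih, List.replicate_succ]

theorem pvRange_succ_map {α : Type} (n : Nat) (f : Nat → α) :
    (List.range (n + 1)).map f = f 0 :: (List.range n).map (fun i => f (i + 1)) := by
  rw [List.range_succ_eq_map]
  simp [List.map_map, Function.comp]

-- main invariant: live states "b"/"a" correspond to expecting 'a'/'b' at an even/odd position
theorem pvLoopA_live (cs : List Char) :
    ((pvLoopA cs "b").map (fun s => if s = "b" then (1 : Int) else 0)
       = (List.range (cs.length + 1)).map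
           (fun i => if i ≤ pvAltK cs 'a' ∧ i % 2 = 0 then (1 : Int) else 0))
    ∧ ((pvLoopA cs "a").map (fun s => if s = "b" then (1 : Int) else 0)
       = (List.range (cs.length + 1)).map
           (fun i => if i ≤ pvAltK cs 'b' ∧ i % 2 = 1 then (1 : Int) else 0)) := by
  induction cs with
  | nil => constructor <;> simp [pvLoopA, pvAltK, List.range_succ]
  | cons c cs ih =>
      obtain ⟨ihb, iha⟩ := ih
      constructor
      · by_cases hc : c = 'a'
        · subst hc
          have e1 : pvLoopA ('a' :: cs) "b" = "b" :: pvLoopA cs "a" := by simp [pvLoopA]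
          have e2 : pvAltK ('a' :: cs) 'a' = 1 + pvAltK cs 'b' := by simp [pvAltK]
          rw [e1, e2, List.length_cons, List.map_cons, pvRange_succ_map]
          congr 1
          rw [iha]
          apply List.map_congr_left
          intro i _
          split_ifs <;> omega
        · have e1 : pvLoopA (c :: cs) "b" = "b" :: pvLoopA cs "!" := by simp [pvLoopA, hc]
          have e2 : pvAltK (c :: cs) 'a' = 0 := by simp [pvAltK, hc]
          rw [e1, e2, List.length_cons, List.map_cons, pvRange_succ_map, pvLoopA_dead]
          congr 1
          norm_num
      · by_cases hc : c = 'b'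
        · subst hc
          have e1 : pvLoopA ('b' :: cs) "a" = "a" :: pvLoopA cs "b" := by simp [pvLoopA]
          have e2 : pvAltK ('b' :: cs) 'b' = 1 + pvAltK cs 'a' := by simp [pvAltK]
          rw [e1, e2, List.length_cons, List.map_cons, pvRange_succ_map]
          congr 1
          rw [ihb]
          apply List.map_congr_left
          intro i _
          split_ifs <;> omega
        · have e1 : pvLoopA (c :: cs) "a" = "a" :: pvLoopA cs "!" := by simp [pvLoopA, hc]
          have e2 : pvAltK (c :: cs) 'b' = 0 := by simp [pvAltK, hc]
          rw [e1, e2, List.length_cons, List.map_cons, pvRange_succ_map, pvLoopA_dead]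
          congr 1
          norm_num

-- ===== VERDICT (by name: the statement is the Claim_ definition above) =====
theorem trace_acceptance_spec : Claim_equal_trace_acceptance := by
  intro s _
  unfold Spec_trace_acceptance trace_acceptance trace_acceptance_alt
  exact (pvLoopA_live s.toList).1
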